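-- pv_equiv track=rewrite | github.com/Ewaldouhlmann/Cs50 | Week 6 (Python)/sentimental-readability/readability.py | get_text_info
-- ===== SOURCE A (Python) =====
-- def get_text_info(text):
--     spaces = 1
--     letters = 0
--     sentences = 0
--     for i in range(0, len(text)):
--         if spaces == 100:
--             break
--         else:
--             if text[i] == ' ':
--                 spaces += 1
--             elif text[i].isalpha():
--                 letters += 1
--             elif text[i] == '.' or text[i] == '?' or text[i] == '!':
--                 sentences += 1
--     return spaces, letters, sentences
-- ===== SOURCE B (Python) =====
-- def _prefix_through_kth_space(text, k):
--     for i, c in enumerate(text):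
--         if c == ' ':
--             k -= 1
--             if k == 0:
--                 return text[:i + 1]
--     return text
--
--
-- def get_text_info(text):
--     prefix = _prefix_through_kth_space(text, 99)
--     spaces = 1 + prefix.count(' ')
--     letters = sum(1 for c in prefix if c.isalpha())
--     sentences = sum(1 for c in prefix if c in '.?!')
--     return spaces, letters, sentences
-- ===== Notes on version B (the rewrite author's own statement) =====
-- stated objective: alternative
-- what changed: Replaces the single stateful break-on-100th-space loop with a 'locate the 99th space, slice the prefix, then tally each count separately' decomposition.
import Mathlib
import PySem

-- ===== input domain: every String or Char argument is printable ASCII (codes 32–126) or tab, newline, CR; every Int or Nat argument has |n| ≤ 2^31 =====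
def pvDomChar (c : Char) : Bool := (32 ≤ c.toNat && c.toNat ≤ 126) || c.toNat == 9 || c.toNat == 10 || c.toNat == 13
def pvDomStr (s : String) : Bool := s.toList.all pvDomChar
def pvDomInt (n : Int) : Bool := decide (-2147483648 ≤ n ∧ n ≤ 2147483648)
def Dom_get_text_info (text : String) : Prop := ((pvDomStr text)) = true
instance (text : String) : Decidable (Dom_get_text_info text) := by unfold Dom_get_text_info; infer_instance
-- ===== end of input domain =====

-- B replaces A's single stateful break-at-100th-space loop by "locate the 99th space,
-- slice the prefix, then tally each count separately" (objective: alternative).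

-- ===== PORT A =====
-- A's for-loop over the characters with the (spaces, letters, sentences) state and the break.
def pvLoopA : List Char → Int → Int → Int → Int × Int × Int
  | [], spaces, letters, sentences => (spaces, letters, sentences)
  | c :: rest, spaces, letters, sentences =>
    if spaces = 100 then (spaces, letters, sentences)
    else if c = ' ' then pvLoopA rest (spaces + 1) letters sentences
    else if PySem.Chars.isalpha c then pvLoopA rest spaces (letters + 1) sentences
    else if c = '.' ∨ c = '?' ∨ c = '!' then pvLoopA rest spaces letters (sentences + 1)
    else pvLoopA rest spaces letters sentences

def get_text_info (text : String) : Int × Int × Int :=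
  pvLoopA text.toList 1 0 0

-- ===== PORT B =====
-- scan for the k-th space; the prefix through it, or all of the text if there are fewer.
def pvPrefixThroughKthSpace : List Char → Nat → List Char
  | [], _ => []
  | c :: rest, k =>
    if c = ' ' then
      if k = 1 then [c] else c :: pvPrefixThroughKthSpace rest (k - 1)
    else c :: pvPrefixThroughKthSpace rest k

def get_text_info_alt (text : String) : Int × Int × Int :=
  let p := pvPrefixThroughKthSpace text.toList 99
  (1 + (p.count ' ' : Int),
   (p.countP (fun c => PySem.Chars.isalpha c) : Int),
   (p.countP (fun c => c == '.' || c == '?' || c == '!') : Int))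

-- ===== PRECONDITION & SPEC =====
def Spec_get_text_info (text : String) (out : Int × Int × Int) : Prop := out = get_text_info_alt text
instance (text : String) (out : Int × Int × Int) : Decidable (Spec_get_text_info text out) := by unfold Spec_get_text_info; infer_instance

-- ===== CLAIM (what is proved, stated in full; the proofs are below) =====
def Claim_equal_get_text_info : Prop := ∀ (text : String), Dom_get_text_info text → Spec_get_text_info text (get_text_info text)

-- ===== LEMMAS AND PROOFS =====

theorem pvLoopA_at_100 (cs : List Char) (l n : Int) : pvLoopA cs 100 l n = (100, l, n) := by
  cases cs <;> simp [pvLoopA]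

theorem pvLoopA_eq (cs : List Char) : ∀ (k : Nat) (l n : Int), 1 ≤ k → k ≤ 99 →
    pvLoopA cs (100 - (k : Int)) l n =
      (100 - (k : Int) + ((pvPrefixThroughKthSpace cs k).count ' ' : Int),
       l + ((pvPrefixThroughKthSpace cs k).countP (fun c => PySem.Chars.isalpha c) : Int),
       n + ((pvPrefixThroughKthSpace cs k).countP (fun c => c == '.' || c == '?' || c == '!') : Int)) := by
  induction cs with
  | nil => intro k l n hk1 hk99; simp [pvLoopA, pvPrefixThroughKthSpace]
  | cons c rest ih =>
    intro k l n hk1 hk99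
    have hne : (100 - (k : Int)) ≠ 100 := by omega
    by_cases hsp : c = ' '
    · subst hsp
      have e1 : PySem.Chars.isalpha ' ' = false := by decide
      by_cases hk : k = 1
      · subst hk
        simp only [pvLoopA, if_neg hne, if_pos rfl, pvPrefixThroughKthSpace]
        rw [show (100 : Int) - ((1 : Nat) : Int) + 1 = 100 by norm_num]
        rw [pvLoopA_at_100]
        simp [List.count_cons, List.countP_cons, e1]
      · have hca : (100 : Int) - (k : Int) + 1 = 100 - ((k - 1 : Nat) : Int) := by omega
        simp only [pvLoopA, if_neg hne, if_pos rfl, pvPrefixThroughKthSpace, if_neg hk]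
        rw [hca, ih (k - 1) l n (by omega) (by omega)]
        simp [List.count_cons, List.countP_cons, e1]
        omega
    · by_cases hal : PySem.Chars.isalpha c = true
      · have hnd : (c == '.' || c == '?' || c == '!') = false := by
          rcases Bool.eq_false_or_eq_true (c == '.' || c == '?' || c == '!') with h | h
          · exfalso
            simp only [Bool.or_eq_true, beq_iff_eq] at h
            rcases h with (h | h) | h <;> subst h <;> exact absurd hal (by decide)
          · exact h
        simp only [pvLoopA, if_neg hne, if_neg hsp, if_pos hal, pvPrefixThroughKthSpace]
        rw [ih k (l + 1) n hk1 hk99]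
        simp [List.count_cons, List.countP_cons, hsp, hal, hnd]
        omega
      · by_cases hp : c = '.' ∨ c = '?' ∨ c = '!'
        · have hct : (c == '.' || c == '?' || c == '!') = true := by
            simp only [Bool.or_eq_true, beq_iff_eq]
            tauto
          have hns : (c == ' ') = false := by simp [hsp]
          simp only [pvLoopA, if_neg hne, if_neg hsp, if_neg hal, if_pos hp,
            pvPrefixThroughKthSpace]
          rw [ih k l (n + 1) hk1 hk99]
          simp [List.count_cons, List.countP_cons, hns, hal, hct]
          omega
        · have hct : (c == '.' || c == '?' || c == '!') = false := by
            simp only [Bool.or_eq_false_iff, beq_eq_false_iff_ne, ne_eq]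
            tauto
          simp only [pvLoopA, if_neg hne, if_neg hsp, if_neg hal, if_neg hp,
            pvPrefixThroughKthSpace]
          rw [ih k l n hk1 hk99]
          simp [List.count_cons, List.countP_cons, hsp, hal, hct]

-- ===== VERDICT (by name: the statement is the Claim_ definition above) =====
theorem get_text_info_spec : Claim_equal_get_text_info := by
  intro text _
  unfold Spec_get_text_info get_text_info get_text_info_alt
  have h := pvLoopA_eq text.toList 99 0 0 (by norm_num) (by norm_num)
  have h1 : (100 : Int) - ((99 : Nat) : Int) = 1 := by norm_num
  rw [h1] at h
  simpa using h
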